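-- pv_equiv track=rewrite | github.com/Froopity/bungo-casino | casino/utils.py | calculate_net_debts
-- ===== SOURCE A (Python) =====
-- def calculate_net_debts(debt_edges):
--   debt_map = {}
--
--   for debtor, creditor, amount in debt_edges:
--     pair = tuple(sorted([debtor, creditor]))
--     if pair not in debt_map:
--       debt_map[pair] = {}
--     debt_map[pair][debtor] = debt_map[pair].get(debtor, 0) + amount
--
--   net_debts = []
--   for (user1, user2), debts in debt_map.items():
--     user1_owes = debts.get(user1, 0)
--     user2_owes = debts.get(user2, 0)
--
--     net = user1_owes - user2_owes
--     if net > 0: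
--       net_debts.append((user1, user2, net))
--     elif net < 0:
--       net_debts.append((user2, user1, -net))
--
--   return net_debts
-- ===== SOURCE B (Python) =====
-- def calculate_net_debts(debt_edges):
--   pairs = []
--   for debtor, creditor, _ in debt_edges:
--     pair = (debtor, creditor) if debtor <= creditor else (creditor, debtor)
--     if pair not in pairs:
--       pairs.append(pair)
--
--   net_debts = []
--   for user1, user2 in pairs:
--     net = sum(a for d, c, a in debt_edges if (d, c) == (user1, user2)) \
--         - sum(a for d, c, a in debt_edges if (d, c) == (user2, user1))
--     if net > 0:
--       net_debts.append((user1, user2, net))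
--     elif net < 0:
--       net_debts.append((user2, user1, -net))
--   return net_debts
-- ===== Notes on version B (the rewrite author's own statement) =====
-- stated objective: alternative
-- what changed: Replaces A's single-pass nested dict of per-user totals by two staged passes: first collect the canonical pairs in first-appearance order into a list, then for each pair recompute its net by scanning all edges and summing matching amounts in each direction; no dict is maintained at all.
import Mathlib
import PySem

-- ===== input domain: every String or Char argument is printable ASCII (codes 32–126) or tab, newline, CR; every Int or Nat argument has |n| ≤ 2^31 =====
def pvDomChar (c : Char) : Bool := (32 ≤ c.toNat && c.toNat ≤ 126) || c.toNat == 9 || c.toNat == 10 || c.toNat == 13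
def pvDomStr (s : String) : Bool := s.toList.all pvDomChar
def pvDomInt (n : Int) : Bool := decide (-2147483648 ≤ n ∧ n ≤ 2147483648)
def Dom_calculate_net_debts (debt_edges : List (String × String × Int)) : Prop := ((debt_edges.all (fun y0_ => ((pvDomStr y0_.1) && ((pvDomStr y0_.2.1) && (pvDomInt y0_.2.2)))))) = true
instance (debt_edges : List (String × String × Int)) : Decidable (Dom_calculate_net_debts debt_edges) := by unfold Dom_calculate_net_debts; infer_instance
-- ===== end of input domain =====

-- B replaces A's one-pass nested dict by two staged passes (collect canonical pairs, then rescan all edges per pair); alternative decomposition, same results.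

-- ===== PORT A =====
-- body of A's first loop: pair = tuple(sorted([debtor, creditor])); setdefault; debt_map[pair][debtor] += amount
def pvStepA (dm : PySem.Dict (String × String) (PySem.Dict String Int)) (e : String × String × Int) :
    PySem.Dict (String × String) (PySem.Dict String Int) :=
  let debtor := e.1
  let creditor := e.2.1
  let amount := e.2.2
  let pair : String × String :=
    match PySem.List.sorted [debtor, creditor] (fun x => x) false with
    | [a, b] => (a, b)
    | _ => (debtor, creditor)   -- unreachable: sorted of a 2-element list has 2 elements
  let dm1 := if dm.contains pair then dm else dm.insert pair PySem.Dict.empty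
  dm1.modify pair PySem.Dict.empty (fun debts => debts.insert debtor (debts.getD debtor 0 + amount))

-- body of A's second loop
def pvEmitA (acc : List (String × String × Int)) (it : (String × String) × PySem.Dict String Int) :
    List (String × String × Int) :=
  let user1 := it.1.1
  let user2 := it.1.2
  let net := it.2.getD user1 0 - it.2.getD user2 0
  if net > 0 then acc ++ [(user1, user2, net)]
  else if net < 0 then acc ++ [(user2, user1, -net)]
  else acc

def calculate_net_debts (debt_edges : List (String × String × Int)) : List (String × String × Int) :=
  ((debt_edges.foldl pvStepA PySem.Dict.empty).items).foldl pvEmitA []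

-- ===== PORT B =====
-- (debtor, creditor) if debtor <= creditor else (creditor, debtor)
def pvCanon (e : String × String × Int) : String × String :=
  if e.1 ≤ e.2.1 then (e.1, e.2.1) else (e.2.1, e.1)

-- body of B's first loop: collect canonical pairs in first-appearance order
def pvPairsStep (ps : List (String × String)) (e : String × String × Int) : List (String × String) :=
  if pvCanon e ∈ ps then ps else ps ++ [pvCanon e]

-- sum(a for d, c, a in edges if (d, c) == (x, y))
def pvS (edges : List (String × String × Int)) (x y : String) : Int :=
  edges.foldl (fun s e => if (e.1, e.2.1) == (x, y) then s + e.2.2 else s) 0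

-- body of B's second loop
def pvEmitB (edges : List (String × String × Int)) (acc : List (String × String × Int))
    (q : String × String) : List (String × String × Int) :=
  let net := pvS edges q.1 q.2 - pvS edges q.2 q.1
  if net > 0 then acc ++ [(q.1, q.2, net)]
  else if net < 0 then acc ++ [(q.2, q.1, -net)]
  else acc

def calculate_net_debts_alt (debt_edges : List (String × String × Int)) : List (String × String × Int) :=
  (debt_edges.foldl pvPairsStep []).foldl (pvEmitB debt_edges) []

-- ===== PRECONDITION & SPEC =====
def Spec_calculate_net_debts (debt_edges : List (String × String × Int)) (out : List (String × String × Int)) : Prop := out = calculate_net_debts_alt debt_edges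
instance (debt_edges : List (String × String × Int)) (out : List (String × String × Int)) : Decidable (Spec_calculate_net_debts debt_edges out) := by unfold Spec_calculate_net_debts; infer_instance

-- ===== CLAIM (what is proved, stated in full; the proofs are below) =====
def Claim_equal_calculate_net_debts : Prop := ∀ (debt_edges : List (String × String × Int)), Dom_calculate_net_debts debt_edges → Spec_calculate_net_debts debt_edges (calculate_net_debts debt_edges)

-- ===== LEMMAS AND PROOFS =====

def pvPairs (es : List (String × String × Int)) : List (String × String) :=
  es.foldl pvPairsStep []

def pvInv (es : List (String × String × Int))
    (dm : PySem.Dict (String × String) (PySem.Dict String Int)) : Prop :=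
  dm.keys.Nodup ∧ dm.keys = pvPairs es ∧
  ∀ p ∈ dm.items, p.1.1 ≤ p.1.2 ∧
    p.2.getD p.1.1 0 - p.2.getD p.1.2 0 = pvS es p.1.1 p.1.2 - pvS es p.1.2 p.1.1

theorem pv_sorted_two (d c : String) :
    PySem.List.sorted [d, c] (fun x => x) false = if c < d then [c, d] else [d, c] := by
  simp [PySem.List.sorted, PySem.List.insertBy]

theorem pv_setdefault_modify (dm : PySem.Dict (String × String) (PySem.Dict String Int))
    (pair : String × String) (d : String) (a : Int) :
    (if dm.contains pair then dm else dm.insert pair PySem.Dict.empty).modify pair PySem.Dict.empty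
        (fun debts => debts.insert d (debts.getD d 0 + a))
      = dm.insert pair ((dm.getD pair PySem.Dict.empty).insert d
          ((dm.getD pair PySem.Dict.empty).getD d 0 + a)) := by
  by_cases hc : dm.contains pair
  · simp only [hc, if_true]; rfl
  · simp only [hc, Bool.false_eq_true, if_false]
    show (dm.insert pair .empty).insert pair
        (((dm.insert pair .empty).getD pair .empty).insert d
          (((dm.insert pair .empty).getD pair .empty).getD d 0 + a)) = _
    rw [PySem.Dict.getD_insert_self, PySem.Dict.insert_insert_self,
      PySem.Dict.getD_of_not_contains dm PySem.Dict.empty (by simpa using hc)]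

theorem pv_stepA_eq (dm : PySem.Dict (String × String) (PySem.Dict String Int))
    (d c : String) (a : Int) :
    pvStepA dm (d, c, a) =
      dm.insert (if c < d then (c, d) else (d, c))
        ((dm.getD (if c < d then (c, d) else (d, c)) PySem.Dict.empty).insert d
          ((dm.getD (if c < d then (c, d) else (d, c)) PySem.Dict.empty).getD d 0 + a)) := by
  unfold pvStepA
  simp only []
  rw [pv_sorted_two]
  by_cases h : c < d
  · simp only [h, if_true]
    exact pv_setdefault_modify dm (c, d) d a
  · simp only [h, if_false]
    exact pv_setdefault_modify dm (d, c) d a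

theorem pv_canon_eq (d c : String) (a : Int) :
    pvCanon (d, c, a) = if c < d then (c, d) else (d, c) := by
  unfold pvCanon
  by_cases h : c < d
  · have : ¬ d ≤ c := not_le.mpr h
    simp [h, this]
  · have : d ≤ c := not_lt.mp h
    simp [h, this]

theorem pv_canon_of (x y d c : String) (a : Int) (hxy : x ≤ y)
    (h : (d = x ∧ c = y) ∨ (d = y ∧ c = x)) : pvCanon (d, c, a) = (x, y) := by
  unfold pvCanon
  rcases h with ⟨hd, hc⟩ | ⟨hd, hc⟩
  · rw [hd, hc]; simp [hxy]
  · rw [hd, hc]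
    by_cases h2 : y ≤ x
    · have hxyeq : x = y := le_antisymm hxy h2
      rw [hxyeq]; simp
    · simp [h2]

theorem pv_cond_false (d c : String) (a : Int) (x y : String) (hxy : x ≤ y)
    (hne : (x, y) ≠ pvCanon (d, c, a)) :
    (((d, c) == (x, y)) = false) ∧ (((d, c) == (y, x)) = false) := by
  constructor
  · apply beq_eq_false_iff_ne.mpr
    intro h
    simp only [Prod.mk.injEq] at h
    exact hne (pv_canon_of x y d c a hxy (Or.inl h)).symm
  · apply beq_eq_false_iff_ne.mpr
    intro h
    simp only [Prod.mk.injEq] at h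
    exact hne (pv_canon_of x y d c a hxy (Or.inr h)).symm

theorem pvS_snoc (es : List (String × String × Int)) (e : String × String × Int) (x y : String) :
    pvS (es ++ [e]) x y = pvS es x y + (if (e.1, e.2.1) == (x, y) then e.2.2 else 0) := by
  unfold pvS
  rw [List.foldl_append, List.foldl_cons, List.foldl_nil]
  cases h : ((e.1, e.2.1) == (x, y))
  · simp [h]
  · simp

theorem pvS_zero (es : List (String × String × Int)) (x y : String)
    (h : ∀ e ∈ es, ((e.1, e.2.1) == (x, y)) = false) : pvS es x y = 0 := by
  induction es with
  | nil => rfl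
  | cons e t ih =>
    have hc := h e (List.mem_cons_self)
    unfold pvS
    rw [List.foldl_cons]
    simp only [hc, Bool.false_eq_true, if_false]
    exact ih (fun e' he' => h e' (List.mem_cons_of_mem _ he'))

theorem pv_pairsStep_subset (ps : List (String × String)) (e : String × String × Int) :
    ps ⊆ pvPairsStep ps e := by
  unfold pvPairsStep
  by_cases h : pvCanon e ∈ ps
  · simp [h]
  · simp only [h, if_false]
    exact List.subset_append_left _ _

theorem pv_foldl_pairs_subset (es : List (String × String × Int)) :
    ∀ ps, ps ⊆ es.foldl pvPairsStep ps := by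
  induction es with
  | nil => intro ps; exact List.Subset.refl ps
  | cons e t ih =>
    intro ps
    exact (pv_pairsStep_subset ps e).trans (ih _)

theorem pv_canon_mem (es : List (String × String × Int)) :
    ∀ ps (e : String × String × Int), e ∈ es → pvCanon e ∈ es.foldl pvPairsStep ps := by
  induction es with
  | nil => intro ps e he; cases he
  | cons e' t ih =>
    intro ps e he
    rcases List.mem_cons.mp he with rfl | he
    · apply pv_foldl_pairs_subset t (pvPairsStep ps e)
      unfold pvPairsStep
      by_cases h : pvCanon e ∈ ps
      · simp only [h, if_true]
      · simp [h]
    · exact ih _ e he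

theorem pv_inv_snoc (es : List (String × String × Int))
    (dm : PySem.Dict (String × String) (PySem.Dict String Int))
    (e : String × String × Int) (h : pvInv es dm) : pvInv (es ++ [e]) (pvStepA dm e) := by
  obtain ⟨d, c, a⟩ := e
  obtain ⟨hnd, hkeys, hitems⟩ := h
  rw [pv_stepA_eq]
  set q : String × String := if c < d then (c, d) else (d, c) with hq
  have hcanon : pvCanon (d, c, a) = q := pv_canon_eq d c a
  have hq12 : q.1 ≤ q.2 := by
    rw [hq]
    by_cases hlt : c < d
    · simp only [hlt, if_true]; exact le_of_lt hlt
    · simp only [hlt, if_false]; exact not_lt.mp hlt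
  have hpairs : pvPairs (es ++ [(d, c, a)]) = pvPairsStep (pvPairs es) (d, c, a) := by
    simp [pvPairs, List.foldl_append]
  set inner := dm.getD q PySem.Dict.empty with hinner
  set v := inner.insert d (inner.getD d 0 + a) with hv
  -- per-item diff equality for the updated pair q
  have hqdiff : ∀ w : PySem.Dict String Int, inner = w →
      v.getD q.1 0 - v.getD q.2 0 - (w.getD q.1 0 - w.getD q.2 0)
        = pvS (es ++ [(d, c, a)]) q.1 q.2 - pvS (es ++ [(d, c, a)]) q.2 q.1
          - (pvS es q.1 q.2 - pvS es q.2 q.1) := by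
    intro w hw
    subst hw
    rw [pvS_snoc, pvS_snoc]
    rcases lt_trichotomy c d with hlt | heq | hgt
    · have hqe : q = (c, d) := by rw [hq]; simp [hlt]
      have hne : c ≠ d := ne_of_lt hlt
      rw [hqe]
      have h1 : v.getD c 0 = inner.getD c 0 := PySem.Dict.getD_insert_of_ne inner _ _ hne
      have h2 : v.getD d 0 = inner.getD d 0 + a := PySem.Dict.getD_insert_self inner d _ 0
      have c1 : ((d, c) == (c, d)) = false := by
        apply beq_eq_false_iff_ne.mpr; intro hcon
        exact hne ((Prod.mk.injEq .. ▸ hcon).2.symm ▸ rfl)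
      have c2 : ((d, c) == (d, c)) = true := by simp
      simp only [h1, h2, c1, c2, Bool.false_eq_true, if_false, if_true]
      omega
    · subst heq
      have hqe : q = (c, c) := by rw [hq]; simp
      rw [hqe]
      have c2 : ((c, c) == (c, c)) = true := by simp
      simp only [c2, if_true]
      omega
    · have hnlt : ¬ c < d := not_lt.mpr (le_of_lt hgt)
      have hqe : q = (d, c) := by rw [hq]; simp [hnlt]
      have hne : c ≠ d := (ne_of_lt hgt).symm
      rw [hqe]
      have h1 : v.getD d 0 = inner.getD d 0 + a := PySem.Dict.getD_insert_self inner d _ 0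
      have h2 : v.getD c 0 = inner.getD c 0 := PySem.Dict.getD_insert_of_ne inner _ _ hne
      have c1 : ((d, c) == (d, c)) = true := by simp
      have c2 : ((d, c) == (c, d)) = false := by
        apply beq_eq_false_iff_ne.mpr; intro hcon
        exact hne ((Prod.mk.injEq .. ▸ hcon).2 ▸ rfl)
      simp only [h1, h2, c1, c2, Bool.false_eq_true, if_false, if_true]
      omega
  -- diff equality for untouched items
  have hold : ∀ p ∈ dm.items, p.1 ≠ q →
      (p.1.1 ≤ p.1.2 ∧
        p.2.getD p.1.1 0 - p.2.getD p.1.2 0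
          = pvS (es ++ [(d, c, a)]) p.1.1 p.1.2 - pvS (es ++ [(d, c, a)]) p.1.2 p.1.1) := by
    intro p hp hpk
    obtain ⟨hle, hdiff⟩ := hitems p hp
    refine ⟨hle, ?_⟩
    have hne : (p.1.1, p.1.2) ≠ pvCanon (d, c, a) := by
      rw [hcanon]; intro hcon; exact hpk (by
        have : p.1 = (p.1.1, p.1.2) := rfl
        rw [this, hcon])
    obtain ⟨f1, f2⟩ := pv_cond_false d c a p.1.1 p.1.2 hle hne
    rw [pvS_snoc, pvS_snoc]
    simp only [f1, f2, Bool.false_eq_true, if_false]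
    omega
  by_cases hc : dm.contains q = true
  · have hkmem : q ∈ dm.keys := (PySem.Dict.contains_iff_mem_keys dm q).mp hc
    refine ⟨PySem.Dict.nodup_keys_insert dm _ _ hnd, ?_, ?_⟩
    · rw [hpairs, PySem.Dict.keys_insert_of_contains dm _ hc, hkeys]
      unfold pvPairsStep
      rw [hcanon]
      have hmemp : q ∈ pvPairs es := hkeys ▸ hkmem
      simp [hmemp]
    · intro p hp
      rw [PySem.Dict.items_insert_of_contains dm _ hc] at hp
      obtain ⟨p0, hp0, hrepl⟩ := List.mem_map.mp hp
      by_cases hk : p0.1 = q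
      · have hpeq : p = (q, v) := by rw [← hrepl]; simp [hk]
        subst hpeq
        have hmem' : (q, p0.2) ∈ dm.items := by rw [← hk]; exact hp0
        have hv0 : inner = p0.2 := by
          rw [hinner]; exact PySem.Dict.getD_of_mem_items dm hmem' hnd _
        obtain ⟨-, hdiff⟩ := hitems p0 hp0
        refine ⟨hq12, ?_⟩
        dsimp only
        have := hqdiff p0.2 hv0
        have hdiff' : p0.2.getD q.1 0 - p0.2.getD q.2 0 = pvS es q.1 q.2 - pvS es q.2 q.1 := by
          rw [hk] at hdiff; exact hdiff
        omega
      · have hpeq : p = p0 := by rw [← hrepl]; simp [hk]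
        subst hpeq
        exact hold p hp0 hk
  · have hcf : dm.contains q = false := by simpa using hc
    have hknm : q ∉ dm.keys := fun hm => hc ((PySem.Dict.contains_iff_mem_keys dm q).mpr hm)
    refine ⟨PySem.Dict.nodup_keys_insert dm _ _ hnd, ?_, ?_⟩
    · rw [hpairs, PySem.Dict.keys_insert_of_not_contains dm _ hcf, hkeys]
      unfold pvPairsStep
      rw [hcanon]
      have hmemp : q ∉ pvPairs es := fun hm => hknm (hkeys ▸ hm)
      simp [hmemp]
    · intro p hp
      rw [PySem.Dict.items_insert_of_not_contains dm _ hcf] at hp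
      rcases List.mem_append.mp hp with hp' | hp'
      · have hpk : p.1 ≠ q := by
          intro hcon
          exact hknm (hcon ▸ PySem.Dict.mem_keys_of_mem_items dm hp')
        exact hold p hp' hpk
      · have hpeq : p = (q, v) := by simpa using hp'
        subst hpeq
        refine ⟨hq12, ?_⟩
        dsimp only
        have hinner0 : inner = PySem.Dict.empty := by
          rw [hinner]; exact PySem.Dict.getD_of_not_contains dm _ hcf
        have hz1 : pvS es q.1 q.2 = 0 := by
          apply pvS_zero
          intro e' he'
          apply beq_eq_false_iff_ne.mpr
          intro hcon
          simp only [Prod.mk.injEq] at hcon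
          have : pvCanon e' = q := by
            obtain ⟨d', c', a'⟩ := e'
            exact pv_canon_of q.1 q.2 d' c' a' hq12 (Or.inl hcon)
          exact hknm (hkeys ▸ (this ▸ pv_canon_mem es [] e' he'))
        have hz2 : pvS es q.2 q.1 = 0 := by
          apply pvS_zero
          intro e' he'
          apply beq_eq_false_iff_ne.mpr
          intro hcon
          simp only [Prod.mk.injEq] at hcon
          have : pvCanon e' = q := by
            obtain ⟨d', c', a'⟩ := e'
            exact pv_canon_of q.1 q.2 d' c' a' hq12 (Or.inr hcon)
          exact hknm (hkeys ▸ (this ▸ pv_canon_mem es [] e' he'))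
        have hz0 : PySem.Dict.empty.getD q.1 (0:Int) - PySem.Dict.empty.getD q.2 0 = 0 := by
          simp [PySem.Dict.getD_empty]
        have := hqdiff PySem.Dict.empty hinner0
        omega

theorem pv_inv_all (es : List (String × String × Int)) :
    pvInv es (es.foldl pvStepA PySem.Dict.empty) := by
  induction es using List.reverseRecOn with
  | nil =>
    refine ⟨PySem.Dict.nodup_keys_empty, rfl, ?_⟩
    intro p hp
    simp [PySem.Dict.empty] at hp
  | append_singleton es e ih =>
    rw [List.foldl_append, List.foldl_cons, List.foldl_nil]
    exact pv_inv_snoc es _ e ih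

theorem pv_emit (edges : List (String × String × Int))
    (items : List ((String × String) × PySem.Dict String Int))
    (h : ∀ p ∈ items, p.2.getD p.1.1 0 - p.2.getD p.1.2 0
        = pvS edges p.1.1 p.1.2 - pvS edges p.1.2 p.1.1) :
    ∀ acc, items.foldl pvEmitA acc = (items.map (·.1)).foldl (pvEmitB edges) acc := by
  induction items with
  | nil => intro acc; rfl
  | cons p t ih =>
    intro acc
    have hnet := h p (List.mem_cons_self)
    have hstep : pvEmitA acc p = pvEmitB edges acc p.1 := by
      simp only [pvEmitA, pvEmitB, hnet]
    simp only [List.foldl_cons, List.map_cons, hstep]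
    exact ih (fun p' hp' => h p' (List.mem_cons_of_mem _ hp')) _

-- ===== VERDICT (by name: the statement is the Claim_ definition above) =====
theorem calculate_net_debts_spec : Claim_equal_calculate_net_debts := by
  intro edges _
  unfold Spec_calculate_net_debts calculate_net_debts calculate_net_debts_alt
  obtain ⟨hnd, hkeys, hitems⟩ := pv_inv_all edges
  have hmap : (edges.foldl pvStepA PySem.Dict.empty).items.map (·.1)
      = edges.foldl pvPairsStep [] := by
    simpa [PySem.Dict.keys, pvPairs] using hkeys
  rw [pv_emit edges _ (fun p hp => (hitems p hp).2), hmap]
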